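-- pv_equiv track=rewrite | github.com/BadAssBradders/GlyphisIO-BBS | Data/OS/OS_Mode.py | _notes_next_bullet_number
-- ===== SOURCE A (Python) =====
-- def _notes_next_bullet_number(existing_text: str) -> int:
--     number = 1
--     lines = [line.strip() for line in existing_text.split("\n") if line.strip()]
--     for line in reversed(lines):
--         if "." in line:
--             prefix = line.split(".", 1)[0]
--             if prefix.isdigit():
--                 number = int(prefix) + 1
--                 break
--     return number
-- ===== SOURCE B (Python) =====
-- def _notes_next_bullet_number(existing_text: str) -> int:
--     number = 1
--     for raw in existing_text.split("\n"):
--         line = raw.strip()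
--         if not line:
--             continue
--         if "." in line:
--             prefix = line.split(".", 1)[0]
--             if prefix.isdigit():
--                 number = int(prefix) + 1
--     return number
-- ===== Notes on version B (the rewrite author's own statement) =====
-- stated objective: simpler
-- what changed: B makes a single forward pass over the raw lines (stripping and skipping empties inline, overwriting the accumulator on every numbered line) instead of A's build-a-filtered-list-then-reverse-scan-with-break.
import Mathlib
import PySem

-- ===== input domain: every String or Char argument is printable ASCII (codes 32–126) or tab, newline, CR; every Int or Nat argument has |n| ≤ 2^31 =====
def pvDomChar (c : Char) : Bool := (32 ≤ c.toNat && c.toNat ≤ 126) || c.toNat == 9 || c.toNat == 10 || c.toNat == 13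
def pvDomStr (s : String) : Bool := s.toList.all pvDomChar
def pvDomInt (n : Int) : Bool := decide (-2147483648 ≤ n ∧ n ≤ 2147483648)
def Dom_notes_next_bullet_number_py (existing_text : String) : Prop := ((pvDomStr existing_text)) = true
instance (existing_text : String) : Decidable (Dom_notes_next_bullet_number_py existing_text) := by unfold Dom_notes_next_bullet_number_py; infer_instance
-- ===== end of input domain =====

-- B replaces A's build-filtered-list-then-reverse-scan-with-break by a single forward pass
-- that strips/skips inline and overwrites the accumulator on every numbered line (objective: simpler).

-- ===== PORT A =====
-- 'for line in reversed(lines): … break' — recursion over the reversed list, returning on the first match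
def pvALoop : List String → Int
  | [] => 1
  | line :: rest =>
    if PySem.Str.isIn "." line then
      let pre := ((PySem.Str.splitMax? line "." 1).getD []).headD ""
      if PySem.Str.strIsdigit pre then (PySem.Int.ofStr? pre).getD 0 + 1
      else pvALoop rest
    else pvALoop rest

def notes_next_bullet_number_py (existing_text : String) : Int :=
  let lines := (((PySem.Str.split? existing_text "\n").getD []).map PySem.Str.strip).filter
    (fun l => !(l == ""))
  pvALoop lines.reverse

-- ===== PORT B =====
-- one forward pass over the raw lines; strip inline, skip empties, overwrite the accumulator
def pvBStep (number : Int) (raw : String) : Int :=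
  let line := PySem.Str.strip raw
  if line == "" then number
  else if PySem.Str.isIn "." line then
    let pre := ((PySem.Str.splitMax? line "." 1).getD []).headD ""
    if PySem.Str.strIsdigit pre then (PySem.Int.ofStr? pre).getD 0 + 1
    else number
  else number

def notes_next_bullet_number_py_alt (existing_text : String) : Int :=
  ((PySem.Str.split? existing_text "\n").getD []).foldl pvBStep 1

-- ===== PRECONDITION & SPEC =====
def Spec_notes_next_bullet_number_py (existing_text : String) (out : Int) : Prop := out = notes_next_bullet_number_py_alt existing_text
instance (existing_text : String) (out : Int) : Decidable (Spec_notes_next_bullet_number_py existing_text out) := by unfold Spec_notes_next_bullet_number_py; infer_instance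

-- ===== CLAIM (what is proved, stated in full; the proofs are below) =====
def Claim_equal_notes_next_bullet_number_py : Prop := ∀ (existing_text : String), Dom_notes_next_bullet_number_py existing_text → Spec_notes_next_bullet_number_py existing_text (notes_next_bullet_number_py existing_text)

-- ===== LEMMAS AND PROOFS =====

-- the per-line update shared semantically by both loops (on an already-stripped, non-empty line)
def pvStepF (number : Int) (line : String) : Int :=
  if PySem.Str.isIn "." line then
    let pre := ((PySem.Str.splitMax? line "." 1).getD []).headD ""
    if PySem.Str.strIsdigit pre then (PySem.Int.ofStr? pre).getD 0 + 1
    else number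
  else number

-- A's reverse scan with break = forward fold keeping the last match
theorem pvALoop_reverse_eq_foldl (ls : List String) :
    pvALoop ls.reverse = ls.foldl pvStepF 1 := by
  induction ls using List.reverseRecOn with
  | nil => rfl
  | append_singleton init last ih =>
    have hcons : ∀ (l : String) (rest : List String),
        pvALoop (l :: rest) = pvStepF (pvALoop rest) l := by
      intro l rest; rfl
    rw [List.reverse_append, List.foldl_append]
    simp only [List.reverse_cons, List.reverse_nil, List.nil_append, List.singleton_append,
      List.foldl_cons, List.foldl_nil]
    rw [hcons, ih]

-- B's inline strip-and-skip fold = A's fold over the stripped, filtered line list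
theorem pvBStep_foldl_eq (raws : List String) (n : Int) :
    raws.foldl pvBStep n
      = ((raws.map PySem.Str.strip).filter (fun l => !(l == ""))).foldl pvStepF n := by
  induction raws generalizing n with
  | nil => rfl
  | cons raw rest ih =>
    simp only [List.foldl_cons, List.map_cons, List.filter_cons]
    by_cases h : PySem.Str.strip raw = ""
    · have hb : pvBStep n raw = n := by simp [pvBStep, h]
      simp [h, hb, ih]
    · have hb : pvBStep n raw = pvStepF n (PySem.Str.strip raw) := by
        simp [pvBStep, pvStepF, h]
      simp [h, hb, ih]

-- ===== VERDICT (by name: the statement is the Claim_ definition above) =====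
theorem notes_next_bullet_number_py_spec : Claim_equal_notes_next_bullet_number_py := by
  intro s _
  show notes_next_bullet_number_py s = notes_next_bullet_number_py_alt s
  unfold notes_next_bullet_number_py notes_next_bullet_number_py_alt
  rw [pvBStep_foldl_eq]
  exact pvALoop_reverse_eq_foldl _
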